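-- pv_equiv track=rewrite | github.com/christinelinster/ls-py110 | lesson_1/lsbot_questions/lsbot_3.py | has_equal_vowels
-- ===== SOURCE A (Python) =====
-- def has_equal_vowels(text):
--     VOWELS = 'aeiou'
--     freq = text.count(VOWELS[0])
--     if freq == 0:
--         return False
--     for c in VOWELS:
--         if text.count(c) != freq:
--             return False
--     return True
-- ===== SOURCE B (Python) =====
-- def has_equal_vowels(text):
--     vowels = sorted(c for c in text if c in 'aeiou')
--     k, r = divmod(len(vowels), 5)
--     return r == 0 and k > 0 and vowels == [v for v in 'aeiou' for _ in range(k)]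
-- ===== Notes on version B (the rewrite author's own statement) =====
-- stated objective: alternative
-- what changed: B extracts the vowels from text, sorts them, and compares the sorted list against the canonical pattern of each vowel repeated len//5 times in order, instead of A's five separate text.count scans compared against the first vowel's count; B does no counting at all.
import Mathlib
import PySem

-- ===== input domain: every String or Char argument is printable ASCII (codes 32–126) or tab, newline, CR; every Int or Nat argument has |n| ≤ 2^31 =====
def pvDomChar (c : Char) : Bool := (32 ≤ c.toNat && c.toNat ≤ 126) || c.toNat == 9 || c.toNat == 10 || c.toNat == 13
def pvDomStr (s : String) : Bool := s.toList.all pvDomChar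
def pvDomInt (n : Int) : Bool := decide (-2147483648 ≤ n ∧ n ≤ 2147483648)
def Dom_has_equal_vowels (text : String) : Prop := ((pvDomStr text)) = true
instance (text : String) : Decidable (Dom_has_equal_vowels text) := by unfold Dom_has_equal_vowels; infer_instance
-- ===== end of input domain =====

-- B sorts the vowels extracted from text and compares them to the canonical pattern
-- a^k e^k i^k o^k u^k (k = len//5), instead of A's five separate text.count scans ('alternative').

-- ===== PORT A =====
def has_equal_vowels (text : String) : Bool :=
  -- VOWELS = 'aeiou'; freq = text.count(VOWELS[0])
  let freq := PySem.Str.count text "a"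
  if freq == 0 then false
  else
    -- for c in VOWELS: if text.count(c) != freq: return False; return True
    "aeiou".toList.all (fun c => PySem.Str.count text (String.ofList [c]) == freq)

-- ===== PORT B =====
def has_equal_vowels_alt (text : String) : Bool :=
  -- vowels = sorted(c for c in text if c in 'aeiou')   ('c in str' for a single char = membership)
  let vowels := PySem.List.sorted (text.toList.filter (fun c => "aeiou".toList.contains c)) (fun x => x) false
  -- k, r = divmod(len(vowels), 5): a nonnegative int, so Nat div/mod are exact here
  let k := vowels.length / 5
  let r := vowels.length % 5
  -- r == 0 and k > 0 and vowels == [v for v in 'aeiou' for _ in range(k)]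
  r == 0 && decide (0 < k) && (vowels == "aeiou".toList.flatMap (fun v => List.replicate k v))

-- ===== PRECONDITION & SPEC =====
def Spec_has_equal_vowels (text : String) (out : Bool) : Prop := out = has_equal_vowels_alt text
instance (text : String) (out : Bool) : Decidable (Spec_has_equal_vowels text out) := by unfold Spec_has_equal_vowels; infer_instance

-- ===== CLAIM (what is proved, stated in full; the proofs are below) =====
def Claim_equal_has_equal_vowels : Prop := ∀ (text : String), Dom_has_equal_vowels text → Spec_has_equal_vowels text (has_equal_vowels text)

-- ===== LEMMAS AND PROOFS =====

-- Python's str.count with a single-character needle is the character count.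
theorem chars_count_go_singleton (c : Char) (s : List Char) (fuel acc : Nat)
    (h : s.length ≤ fuel) :
    PySem.Chars.count.go [c] fuel s acc = acc + s.count c := by
  induction s generalizing fuel acc with
  | nil => cases fuel <;> simp [PySem.Chars.count.go]
  | cons x t ih =>
    cases fuel with
    | zero => simp at h
    | succ n =>
      simp only [List.length_cons, Nat.succ_le_succ_iff] at h
      by_cases hx : x = c
      · subst hx
        simp [PySem.Chars.count.go, List.isPrefixOf, ih _ _ h]
        omega
      · have : ([c].isPrefixOf (x :: t)) = false := by
          simp [List.isPrefixOf]; exact fun h' => (hx h'.symm).elim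
        simp [PySem.Chars.count.go, this, ih _ _ h, hx]

theorem str_count_singleton (text : String) (c : Char) :
    PySem.Str.count text (String.ofList [c]) = text.toList.count c := by
  rw [PySem.Str.count_eq]
  simpa [PySem.Chars.count] using
    chars_count_go_singleton c text.toList text.toList.length 0 le_rfl

-- the canonical sorted vowel pattern a^k e^k i^k o^k u^k
def vowelPattern (k : Nat) : List Char := "aeiou".toList.flatMap (fun v => List.replicate k v)

theorem pairwise_rep_app (k : Nat) (a : Char) (l : List Char)
    (hl : l.Pairwise (· ≤ ·)) (hb : ∀ b ∈ l, a ≤ b) :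
    (List.replicate k a ++ l).Pairwise (· ≤ ·) := by
  rw [List.pairwise_append]
  refine ⟨List.pairwise_replicate.mpr (Or.inr (le_refl a)), hl, ?_⟩
  intro x hx y hy
  rw [List.eq_of_mem_replicate hx]
  exact hb y hy

theorem reps_lb (a : Char) (vs : List Char) (k : Nat)
    (h : ∀ v ∈ vs, a ≤ v) : ∀ b ∈ vs.flatMap (fun v => List.replicate k v), a ≤ b := by
  intro b hb
  rw [List.mem_flatMap] at hb
  obtain ⟨v, hv, hbv⟩ := hb
  rw [List.eq_of_mem_replicate hbv]
  exact h v hv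

theorem pattern_pairwise_of (vs : List Char) (k : Nat) (h : vs.Pairwise (· ≤ ·)) :
    (vs.flatMap (fun v => List.replicate k v)).Pairwise (· ≤ ·) := by
  induction vs with
  | nil => simp
  | cons x t ih =>
    rw [List.flatMap_cons]
    rcases List.pairwise_cons.mp h with ⟨hx, ht⟩
    exact pairwise_rep_app _ _ _ (ih ht) (reps_lb x t k hx)

theorem vowelPattern_pairwise (k : Nat) : (vowelPattern k).Pairwise (· ≤ ·) :=
  pattern_pairwise_of _ _ (by decide)

theorem vowelPattern_length (k : Nat) : (vowelPattern k).length = 5 * k := by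
  have h : "aeiou".toList = ['a','e','i','o','u'] := rfl
  simp only [vowelPattern, h, List.flatMap_cons, List.flatMap_nil, List.append_nil,
    List.length_append, List.length_replicate]
  omega

theorem count_vowelPattern (k : Nat) (c : Char) :
    (vowelPattern k).count c = if c ∈ "aeiou".toList then k else 0 := by
  have h : "aeiou".toList = ['a','e','i','o','u'] := rfl
  simp only [vowelPattern, h, List.flatMap_cons, List.flatMap_nil, List.append_nil,
    List.count_append, List.count_replicate]
  by_cases hc : c ∈ (['a','e','i','o','u'] : List Char)
  · fin_cases hc <;> simp
  · simp only [List.mem_cons, List.not_mem_nil, or_false, not_or] at hc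
    obtain ⟨h1, h2, h3, h4, h5⟩ := hc
    simp [Ne.symm h1, Ne.symm h2, Ne.symm h3, Ne.symm h4, Ne.symm h5]
    all_goals tauto

theorem count_vowelFilter (l : List Char) (c : Char) :
    (l.filter (fun c => "aeiou".toList.contains c)).count c =
      if c ∈ "aeiou".toList then l.count c else 0 := by
  by_cases hc : c ∈ "aeiou".toList
  · rw [if_pos hc, List.count_filter (by simpa using hc)]
  · rw [if_neg hc, List.count_eq_zero]
    intro hmem
    exact hc (by simpa using (List.mem_filter.mp hmem).2)

-- B is true exactly when every vowel occurs count 'a' times and that count is nonzero.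
theorem alt_true_iff (text : String) :
    has_equal_vowels_alt text = true ↔
      (text.toList.count 'a' ≠ 0 ∧ ∀ v ∈ "aeiou".toList, text.toList.count v = text.toList.count 'a') := by
  unfold has_equal_vowels_alt
  simp only [Bool.and_eq_true, beq_iff_eq, decide_eq_true_eq]
  generalize hl : text.toList = l
  constructor
  · rintro ⟨⟨hr, hk⟩, hs⟩
    rw [PySem.List.length_sorted] at hr hk hs
    have hpat : "aeiou".toList.flatMap
        (fun v => List.replicate ((l.filter (fun c => "aeiou".toList.contains c)).length / 5) v)
        = vowelPattern ((l.filter (fun c => "aeiou".toList.contains c)).length / 5) := rfl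
    rw [hpat] at hs
    have hperm : (vowelPattern ((l.filter (fun c => "aeiou".toList.contains c)).length / 5)).Perm
        (l.filter (fun c => "aeiou".toList.contains c)) :=
      hs ▸ (PySem.List.sorted_perm _ _ _)
    have hcount : ∀ v ∈ "aeiou".toList,
        l.count v = (l.filter (fun c => "aeiou".toList.contains c)).length / 5 := by
      intro v hv
      have h1 := (List.perm_iff_count.mp hperm v)
      rw [count_vowelPattern, count_vowelFilter, if_pos hv, if_pos hv] at h1
      exact h1.symm
    have hka := hcount 'a' (by decide)
    exact ⟨by omega, fun v hv => by rw [hcount v hv, hka]⟩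
  · rintro ⟨h0, hall⟩
    have hperm : (vowelPattern (l.count 'a')).Perm (l.filter (fun c => "aeiou".toList.contains c)) := by
      rw [List.perm_iff_count]
      intro c
      rw [count_vowelPattern, count_vowelFilter]
      by_cases hc : c ∈ "aeiou".toList
      · rw [if_pos hc, if_pos hc, hall c hc]
      · rw [if_neg hc, if_neg hc]
    have hlen : (l.filter (fun c => "aeiou".toList.contains c)).length = 5 * l.count 'a' := by
      rw [← hperm.length_eq, vowelPattern_length]
    have hs : PySem.List.sorted (l.filter (fun c => "aeiou".toList.contains c)) (fun x => x) false
        = vowelPattern (l.count 'a') :=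
      PySem.List.sorted_id_eq_of_perm_of_pairwise _ _ hperm (vowelPattern_pairwise _)
    rw [PySem.List.length_sorted, hlen]
    have hdiv : 5 * l.count 'a' / 5 = l.count 'a' := by omega
    rw [hdiv, hs]
    exact ⟨⟨by omega, by omega⟩, rfl⟩

theorem a_true_iff (text : String) :
    has_equal_vowels text = true ↔
      (text.toList.count 'a' ≠ 0 ∧ ∀ v ∈ "aeiou".toList, text.toList.count v = text.toList.count 'a') := by
  have ha : PySem.Str.count text "a" = text.toList.count 'a' := by
    simpa using str_count_singleton text 'a'
  unfold has_equal_vowels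
  simp only [ha, str_count_singleton, beq_iff_eq]
  by_cases h0 : text.toList.count 'a' = 0
  · simp [h0]
  · simp [h0]

-- ===== VERDICT (by name: the statement is the Claim_ definition above) =====
theorem has_equal_vowels_spec : Claim_equal_has_equal_vowels := by
  intro text _
  unfold Spec_has_equal_vowels
  rw [Bool.eq_iff_iff, a_true_iff, alt_true_iff]
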